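-- pv_equiv track=rewrite | github.com/be-kid/Python_JavaScript | 데브매칭/test.py | solution
-- ===== SOURCE A (Python) =====
-- def solution(n, horizontal):
--     room = [[0 for i in range(n)] for j in range(n)]
--
--     now = [0, 0]
--     room[0][0] = 1
--     num = 2
--
--     def rightAndBottom(cnt, num):
--         for i in range(cnt):
--             room[now[0]][now[1]] = num
--             num += 1
--             now[0] += 1
--         now[0] -= 1
--         now[1] -= 1
--         for i in range(cnt-1):
--             room[now[0]][now[1]] = num
--             num += 1
--             now[1] -= 1
--         now[1] += 1
--
--         return num
--
--     def bottomAndRight(cnt, num):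
--         for i in range(cnt):
--             room[now[0]][now[1]] = num
--             num += 1
--             now[1] += 1
--         now[1] -= 1
--         now[0] -= 1
--         for i in range(cnt-1):
--             room[now[0]][now[1]] = num
--             num += 1
--             now[0] -= 1
--         now[0] += 1
--
--         return num
--
--     # true면 오른쪽 이동 후 아래로, false면 아래로 이동 후 오른쪽으로
--     for i in range(1, n):
--         if horizontal:
--             now[1] += 1
--             num = rightAndBottom(i+1, num)
--         else:
--             now[0] += 1
--             num = bottomAndRight(i+1, num)
--
--         horizontal = not horizontal
--
--     return room
-- ===== SOURCE B (Python) =====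
-- def solution(n, horizontal):
--     # Closed form: cell (r, c) in diagonal layer m = max(r, c) gets its number
--     # directly; no mutable walker or helper functions.
--     out = []
--     for r in range(n):
--         row = []
--         for c in range(n):
--             m = r if r >= c else c
--             if m == 0:
--                 row.append(1)
--             else:
--                 base = m * m + 1
--                 column_first = horizontal if m % 2 == 1 else not horizontal
--                 if column_first:
--                     row.append(base + r if c == m else base + m + (m - c))
--                 else:
--                     row.append(base + c if r == m else base + m + (m - r))
--         out.append(row)
--     return out
-- ===== Notes on version B (the rewrite author's own statement) =====
-- stated objective: alternative
-- what changed: Replaces the mutable walker (position `now`, two helper functions filling a column then a row per layer) by a closed-form per-cell formula: cell (r,c) in diagonal layer m=max(r,c) gets m*m+1 plus an offset determined by the layer's alternating orientation, assembled by a plain double comprehension.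
import Mathlib
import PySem

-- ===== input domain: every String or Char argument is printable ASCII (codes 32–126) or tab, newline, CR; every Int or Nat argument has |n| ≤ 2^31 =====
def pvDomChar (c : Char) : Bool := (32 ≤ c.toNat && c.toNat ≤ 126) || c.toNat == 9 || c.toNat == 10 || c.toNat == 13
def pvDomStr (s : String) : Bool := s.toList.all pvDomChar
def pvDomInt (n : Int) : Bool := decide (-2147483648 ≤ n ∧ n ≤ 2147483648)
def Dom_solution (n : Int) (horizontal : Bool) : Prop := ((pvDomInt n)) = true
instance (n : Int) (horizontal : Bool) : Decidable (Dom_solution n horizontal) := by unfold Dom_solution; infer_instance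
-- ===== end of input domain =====

-- B replaces A's mutable walker and helper functions by a closed-form per-cell
-- formula on the diagonal layer m = max(r,c) (objective: alternative algorithm).

-- ===== PORT A =====
-- room[a][b] = v  (the grid mutation A performs; indices are in range on Pre_)
def set2 (g : List (List Int)) (a b v : Int) : List (List Int) :=
  PySem.List.pySetD g a (PySem.List.pySetD (PySem.List.pyGetD g a []) b v)

-- first loop of rightAndBottom: cnt iterations, now[0] += 1 each step
def fillD : Nat → List (List Int) → Int → Int → Int → List (List Int) × Int × Int
  | 0, g, r, _, num => (g, r, num)
  | k+1, g, r, c, num => fillD k (set2 g r c num) (r+1) c (num+1)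

-- second loop of rightAndBottom: now[1] -= 1 each step
def fillL : Nat → List (List Int) → Int → Int → Int → List (List Int) × Int × Int
  | 0, g, _, c, num => (g, c, num)
  | k+1, g, r, c, num => fillL k (set2 g r c num) r (c-1) (num+1)

-- first loop of bottomAndRight: now[1] += 1 each step
def fillR : Nat → List (List Int) → Int → Int → Int → List (List Int) × Int × Int
  | 0, g, _, c, num => (g, c, num)
  | k+1, g, r, c, num => fillR k (set2 g r c num) r (c+1) (num+1)

-- second loop of bottomAndRight: now[0] -= 1 each step
def fillU : Nat → List (List Int) → Int → Int → Int → List (List Int) × Int × Int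
  | 0, g, r, _, num => (g, r, num)
  | k+1, g, r, c, num => fillU k (set2 g r c num) (r-1) c (num+1)

def rightAndBottom (cnt : Int) (g : List (List Int)) (n0 n1 num : Int) :
    List (List Int) × Int × Int × Int :=
  let p := fillD cnt.toNat g n0 n1 num
  let n0 := p.2.1 - 1
  let n1 := n1 - 1
  let q := fillL (cnt-1).toNat p.1 n0 n1 p.2.2
  (q.1, n0, q.2.1 + 1, q.2.2)

def bottomAndRight (cnt : Int) (g : List (List Int)) (n0 n1 num : Int) :
    List (List Int) × Int × Int × Int :=
  let p := fillR cnt.toNat g n0 n1 num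
  let n1 := p.2.1 - 1
  let n0 := n0 - 1
  let q := fillU (cnt-1).toNat p.1 n0 n1 p.2.2
  (q.1, q.2.1 + 1, n1, q.2.2)

def stepA (st : List (List Int) × Int × Int × Int × Bool) (i : Int) :
    List (List Int) × Int × Int × Int × Bool :=
  let (g, n0, n1, num, h) := st
  if h then
    let t := rightAndBottom (i+1) g n0 (n1+1) num
    (t.1, t.2.1, t.2.2.1, t.2.2.2, !h)
  else
    let t := bottomAndRight (i+1) g (n0+1) n1 num
    (t.1, t.2.1, t.2.2.1, t.2.2.2, !h)

def solution (n : Int) (horizontal : Bool) : List (List Int) :=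
  let room := (PySem.List.pyRange 0 n 1).map
    (fun _ => (PySem.List.pyRange 0 n 1).map (fun _ => (0:Int)))
  let room := set2 room 0 0 1
  ((PySem.List.pyRange 1 n 1).foldl stepA (room, 0, 0, 2, horizontal)).1

-- ===== PORT B =====
-- per-cell value of B; `if r ≥ c then r else c` is Source B's `r if r >= c else c`
def valB (h : Bool) (r c : Int) : Int :=
  let m := if r ≥ c then r else c
  if m = 0 then 1
  else
    let base := m * m + 1
    let columnFirst := if PySem.Int.mod m 2 = 1 then h else !h
    if columnFirst then (if c = m then base + r else base + m + (m - c))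
    else (if r = m then base + c else base + m + (m - r))

def solution_alt (n : Int) (horizontal : Bool) : List (List Int) :=
  (PySem.List.pyRange 0 n 1).map (fun r =>
    (PySem.List.pyRange 0 n 1).map (fun c => valB horizontal r c))

-- ===== PRECONDITION & SPEC =====
-- Pre_ excludes n ≤ 0, on which A raises IndexError (room[0][0] on an empty room).
def Pre_solution (n : Int) (horizontal : Bool) : Prop := 1 ≤ n
instance (n : Int) (horizontal : Bool) : Decidable (Pre_solution n horizontal) := by
  unfold Pre_solution; infer_instance

def pvWitness_solution : Int × Bool := (3, true)

def Spec_solution (n : Int) (horizontal : Bool) (out : List (List Int)) : Prop :=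
  out = solution_alt n horizontal
instance (n : Int) (horizontal : Bool) (out : List (List Int)) : Decidable (Spec_solution n horizontal out) := by
  unfold Spec_solution; infer_instance

-- ===== CLAIM (what is proved, stated in full; the proofs are below) =====
def Claim_equal_solution : Prop := ∀ (n : Int) (horizontal : Bool),
  Dom_solution n horizontal → Pre_solution n horizontal →
  Spec_solution n horizontal (solution n horizontal)

-- ===== LEMMAS AND PROOFS =====

-- proof-side view of the grid
def shapeN (N : Nat) (g : List (List Int)) : Prop :=
  g.length = N ∧ ∀ row ∈ g, row.length = N
def getc (g : List (List Int)) (r c : Nat) : Int := (g.getD r []).getD c 0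

-- orientation of layer m (m ≥ 1): true = column filled first (rightAndBottom)
def colFirstAt (h : Bool) (m : Nat) : Bool := if m % 2 = 1 then h else !h

def invNow (h : Bool) (m : Nat) : Int × Int :=
  if m = 0 then (0, 0) else if colFirstAt h m then ((m:Int), 0) else (0, (m:Int))

def WalkInv (N : Nat) (h : Bool) (m : Nat)
    (st : List (List Int) × Int × Int × Int × Bool) : Prop :=
  shapeN N st.1 ∧
  st.2.1 = (invNow h m).1 ∧ st.2.2.1 = (invNow h m).2 ∧
  st.2.2.2.1 = ((m:Int)+1)^2 + 1 ∧
  st.2.2.2.2 = colFirstAt h (m+1) ∧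
  ∀ r c : Nat, r < N → c < N →
    getc st.1 r c = if max r c ≤ m then valB h r c else 0

theorem getD_set_row (g : List (List Int)) (a r : Nat) (row' : List Int)
    (ha : a < g.length) :
    (g.set a row').getD r [] = if r = a then row' else g.getD r [] := by
  by_cases h : r = a
  · subst h; simp [List.getD, List.getElem?_set_self ha]
  · simp [List.getD, List.getElem?_set_ne (fun e => h e.symm), h]

theorem getD_set_entry (l : List Int) (b c : Nat) (v : Int) (hb : b < l.length) :
    (l.set b v).getD c 0 = if c = b then v else l.getD c 0 := by
  by_cases h : c = b
  · subst h; simp [List.getD, List.getElem?_set_self hb]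
  · simp [List.getD, List.getElem?_set_ne (fun e => h e.symm), h]

theorem rowlen {N : Nat} {g : List (List Int)} (hg : shapeN N g) {a : Nat}
    (ha : a < N) : (g.getD a []).length = N := by
  obtain ⟨hlen, hrow⟩ := hg
  have haL : a < g.length := by omega
  rw [List.getD_eq_getElem _ _ haL]
  exact hrow _ (List.getElem_mem haL)

theorem set2_shape {N : Nat} {g : List (List Int)} (hg : shapeN N g)
    {a b : Nat} (ha : a < N) (hb : b < N) (v : Int) :
    shapeN N (set2 g (a:Int) (b:Int) v) := by
  obtain ⟨hlen, hrow⟩ := hg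
  unfold set2
  simp only [PySem.List.pySetD_natCast, PySem.List.pyGetD_natCast]
  refine ⟨by simpa using hlen, fun row hmem => ?_⟩
  rcases List.mem_or_eq_of_mem_set hmem with h | h
  · exact hrow _ h
  · subst h
    rw [List.length_set]
    exact rowlen ⟨hlen, hrow⟩ ha

theorem set2_getc {N : Nat} {g : List (List Int)} (hg : shapeN N g)
    {a b : Nat} (ha : a < N) (hb : b < N) (v : Int) (r c : Nat) :
    getc (set2 g (a:Int) (b:Int) v) r c =
      if r = a ∧ c = b then v else getc g r c := by
  have haL : a < g.length := hg.1 ▸ ha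
  have hbL : b < (g.getD a []).length := by rw [rowlen hg ha]; exact hb
  unfold set2 getc
  simp only [PySem.List.pySetD_natCast, PySem.List.pyGetD_natCast]
  rw [getD_set_row _ _ _ _ haL]
  by_cases hra : r = a
  · subst hra
    rw [if_pos rfl, getD_set_entry _ _ _ _ hbL]
    by_cases hcb : c = b
    · simp [hcb]
    · simp [hcb]
  · simp [hra]

theorem fillD_spec {N : Nat} (k : Nat) :
    ∀ (g : List (List Int)) (r c : Nat) (num : Int), shapeN N g →
    r + k ≤ N → c < N →
    ∃ g', fillD k g (r:Int) (c:Int) num = (g', ((r+k : Nat) : Int), num + k) ∧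
      shapeN N g' ∧
      ∀ r' c' : Nat, getc g' r' c' =
        if c' = c ∧ r ≤ r' ∧ r' < r + k then num + ((r':Int) - r) else getc g r' c' := by
  induction k with
  | zero =>
    intro g r c num hg _ _
    refine ⟨g, by simp [fillD], hg, fun r' c' => ?_⟩
    rw [if_neg (by omega)]
  | succ k ih =>
    intro g r c num hg hrk hc
    have hrN : r < N := by omega
    have hset := set2_shape hg hrN hc num
    obtain ⟨g', heq, hg', hget⟩ := ih (set2 g (r:Int) (c:Int) num) (r+1) c (num+1) hset (by omega) hc
    refine ⟨g', ?_, hg', fun r' c' => ?_⟩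
    · show fillD k (set2 g (r:Int) (c:Int) num) ((r:Int)+1) (c:Int) (num+1) = _
      rw [show ((r:Int)+1) = ((r+1 : Nat) : Int) by push_cast; ring, heq]
      simp only [Prod.mk.injEq]
      exact ⟨trivial, by push_cast; ring, by push_cast; ring⟩
    · rw [hget r' c', set2_getc hg hrN hc num r' c']
      split_ifs with h1 h2 h3 h4 h5 <;> try (push_cast; omega)
      all_goals (exfalso; omega)

theorem fillL_spec {N : Nat} (k : Nat) :
    ∀ (g : List (List Int)) (r c : Nat) (num : Int), shapeN N g →
    r < N → c < N → k ≤ c + 1 →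
    ∃ g', fillL k g (r:Int) (c:Int) num = (g', (c:Int) - k, num + k) ∧
      shapeN N g' ∧
      ∀ r' c' : Nat, getc g' r' c' =
        if r' = r ∧ c' ≤ c ∧ c < c' + k then num + ((c:Int) - c') else getc g r' c' := by
  induction k with
  | zero =>
    intro g r c num hg _ _ _
    refine ⟨g, by simp [fillL], hg, fun r' c' => ?_⟩
    rw [if_neg (by omega)]
  | succ k ih =>
    intro g r c num hg hr hc hk
    have hset := set2_shape hg hr hc num
    rcases Nat.eq_zero_or_pos c with hc0 | hcpos
    · subst hc0
      have hk0 : k = 0 := by omega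
      subst hk0
      refine ⟨set2 g (r:Int) 0 num, by simp [fillL], hset, fun r' c' => ?_⟩
      have hgc := set2_getc hg hr hc num r' c'
      simp only [Nat.cast_zero] at hgc
      rw [hgc]
      split_ifs with h1 h2 h3 <;> try (push_cast; omega)
      all_goals (exfalso; omega)
    · have hcast : ((c-1 : Nat) : Int) = (c:Int) - 1 := by
        push_cast [Nat.cast_sub hcpos]; ring
      obtain ⟨g', heq, hg', hget⟩ := ih (set2 g (r:Int) (c:Int) num) r (c-1) (num+1) hset hr (by omega) (by omega)
      refine ⟨g', ?_, hg', fun r' c' => ?_⟩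
      · show fillL k (set2 g (r:Int) (c:Int) num) (r:Int) ((c:Int)-1) (num+1) = _
        rw [← hcast, heq]
        simp only [Prod.mk.injEq]
        refine ⟨trivial, by rw [hcast]; push_cast; ring, by push_cast; ring⟩
      · rw [hget r' c', set2_getc hg hr hc num r' c']
        rw [show (num + 1 + ((((c-1:Nat)):Int) - (c':Nat))) = num + ((c:Int) - c') by rw [hcast]; ring]
        split_ifs with h1 h2 h3 h4 h5 <;> first | rfl | (exfalso; omega) | (push_cast at *; omega)

theorem fillR_spec {N : Nat} (k : Nat) :
    ∀ (g : List (List Int)) (r c : Nat) (num : Int), shapeN N g →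
    c + k ≤ N → r < N →
    ∃ g', fillR k g (r:Int) (c:Int) num = (g', ((c+k : Nat) : Int), num + k) ∧
      shapeN N g' ∧
      ∀ r' c' : Nat, getc g' r' c' =
        if r' = r ∧ c ≤ c' ∧ c' < c + k then num + ((c':Int) - c) else getc g r' c' := by
  induction k with
  | zero =>
    intro g r c num hg _ _
    refine ⟨g, by simp [fillR], hg, fun r' c' => ?_⟩
    rw [if_neg (by omega)]
  | succ k ih =>
    intro g r c num hg hck hr
    have hcN : c < N := by omega
    have hset := set2_shape hg hr hcN num
    obtain ⟨g', heq, hg', hget⟩ := ih (set2 g (r:Int) (c:Int) num) r (c+1) (num+1) hset (by omega) hr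
    refine ⟨g', ?_, hg', fun r' c' => ?_⟩
    · show fillR k (set2 g (r:Int) (c:Int) num) (r:Int) ((c:Int)+1) (num+1) = _
      rw [show ((c:Int)+1) = ((c+1 : Nat) : Int) by push_cast; ring, heq]
      simp only [Prod.mk.injEq]
      exact ⟨trivial, by push_cast; ring, by push_cast; ring⟩
    · rw [hget r' c', set2_getc hg hr hcN num r' c']
      split_ifs with h1 h2 h3 h4 h5 <;> try (push_cast; omega)
      all_goals (exfalso; omega)

theorem fillU_spec {N : Nat} (k : Nat) :
    ∀ (g : List (List Int)) (r c : Nat) (num : Int), shapeN N g →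
    c < N → r < N → k ≤ r + 1 →
    ∃ g', fillU k g (r:Int) (c:Int) num = (g', (r:Int) - k, num + k) ∧
      shapeN N g' ∧
      ∀ r' c' : Nat, getc g' r' c' =
        if c' = c ∧ r' ≤ r ∧ r < r' + k then num + ((r:Int) - r') else getc g r' c' := by
  induction k with
  | zero =>
    intro g r c num hg _ _ _
    refine ⟨g, by simp [fillU], hg, fun r' c' => ?_⟩
    rw [if_neg (by omega)]
  | succ k ih =>
    intro g r c num hg hc hr hk
    have hset := set2_shape hg hr hc num
    rcases Nat.eq_zero_or_pos r with hr0 | hrpos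
    · subst hr0
      have hk0 : k = 0 := by omega
      subst hk0
      refine ⟨set2 g 0 (c:Int) num, by simp [fillU], hset, fun r' c' => ?_⟩
      have hgc := set2_getc hg hr hc num r' c'
      simp only [Nat.cast_zero] at hgc
      rw [hgc]
      split_ifs with h1 h2 h3 <;> try (push_cast; omega)
      all_goals (exfalso; omega)
    · have hcast : ((r-1 : Nat) : Int) = (r:Int) - 1 := by
        push_cast [Nat.cast_sub hrpos]; ring
      obtain ⟨g', heq, hg', hget⟩ := ih (set2 g (r:Int) (c:Int) num) (r-1) c (num+1) hset hc (by omega) (by omega)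
      refine ⟨g', ?_, hg', fun r' c' => ?_⟩
      · show fillU k (set2 g (r:Int) (c:Int) num) ((r:Int)-1) (c:Int) (num+1) = _
        rw [← hcast, heq]
        simp only [Prod.mk.injEq]
        refine ⟨trivial, by rw [hcast]; push_cast; ring, by push_cast; ring⟩
      · rw [hget r' c', set2_getc hg hr hc num r' c']
        rw [show (num + 1 + ((((r-1:Nat)):Int) - (r':Nat))) = num + ((r:Int) - r') by rw [hcast]; ring]
        split_ifs with h1 h2 h3 h4 h5 <;> first | rfl | (exfalso; omega) | (push_cast at *; omega)

theorem colFirstAt_succ (h : Bool) (m : Nat) :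
    colFirstAt h (m+1) = !colFirstAt h m := by
  unfold colFirstAt
  rcases Nat.mod_two_eq_zero_or_one m with e | e
  · have e' : (m+1) % 2 = 1 := by omega
    simp [e, e']
  · have e' : (m+1) % 2 = 0 := by omega
    simp [e, e']

theorem invNow_of_colFirst_succ_true {h : Bool} {m : Nat}
    (hc : colFirstAt h (m+1) = true) : invNow h m = (0, (m:Int)) := by
  unfold invNow
  by_cases h0 : m = 0
  · simp [h0]
  · rw [colFirstAt_succ] at hc
    simp [h0, show colFirstAt h m = false by revert hc; cases colFirstAt h m <;> simp]

theorem invNow_of_colFirst_succ_false {h : Bool} {m : Nat}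
    (hc : colFirstAt h (m+1) = false) : invNow h m = ((m:Int), 0) := by
  unfold invNow
  by_cases h0 : m = 0
  · simp [h0]
  · rw [colFirstAt_succ] at hc
    simp [h0, show colFirstAt h m = true by revert hc; cases colFirstAt h m <;> simp]

theorem valB_char (h : Bool) (M r c : Nat) (hM : 1 ≤ M) (hmax : max r c = M) :
    valB h (r:Int) (c:Int) =
      if colFirstAt h M then
        (if c = M then ((M:Int)*M+1) + r else ((M:Int)*M+1) + M + ((M:Int) - c))
      else
        (if r = M then ((M:Int)*M+1) + c else ((M:Int)*M+1) + M + ((M:Int) - r)) := by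
  have hmx : (if (r:Int) ≥ (c:Int) then (r:Int) else (c:Int)) = (M:Int) := by
    split_ifs <;> omega
  have hmod : PySem.Int.mod (M:Int) 2 = ((M % 2 : Nat) : Int) := by
    exact_mod_cast PySem.Int.mod_natCast M 2
  unfold valB colFirstAt
  rw [hmx]
  rw [if_neg (by exact_mod_cast (show ¬ M = 0 by omega) : ¬ (M:Int) = 0)]
  simp only [hmod]
  have hm2 : ((M % 2 : Nat) : Int) = 1 ↔ M % 2 = 1 := by exact_mod_cast Iff.rfl
  have hcM : ((c:Int) = (M:Int)) ↔ c = M := by exact_mod_cast Iff.rfl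
  have hrM : ((r:Int) = (M:Int)) ↔ r = M := by exact_mod_cast Iff.rfl
  split_ifs with h1 h2 h3 h4 h5 h6 h7 h8 <;>
    simp_all <;> omega

theorem rnb_inv {N m : Nat} {g : List (List Int)} {num : Int}
    (hm : m + 1 < N) (hsh : shapeN N g) :
    ∃ g', rightAndBottom ((m:Int)+2) g 0 ((m:Int)+1) num
        = (g', ((m:Int)+1), 0, num + 2*(m:Int) + 3) ∧ shapeN N g' ∧
      ∀ r c : Nat, getc g' r c =
        if c = m+1 ∧ r ≤ m+1 then num + r
        else if r = m+1 ∧ c ≤ m then num + 2*((m:Int)+1) - c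
        else getc g r c := by
  obtain ⟨g1, e1, hsh1, hget1⟩ := fillD_spec (N := N) (m+2) g 0 (m+1) num hsh (by omega) (by omega)
  obtain ⟨g2, e2, hsh2, hget2⟩ := fillL_spec (N := N) (m+1) g1 (m+1) m (num + (m:Int) + 2) hsh1 (by omega) (by omega) (by omega)
  refine ⟨g2, ?_, hsh2, fun r c => ?_⟩
  · unfold rightAndBottom
    rw [show ((m:Int)+2).toNat = m+2 by omega,
        show (0:Int) = ((0:Nat):Int) by norm_num,
        show (m:Int)+1 = ((m+1:Nat):Int) by push_cast; ring,
        e1, Nat.zero_add]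
    dsimp only
    rw [show ((m:Int)+2-1).toNat = m+1 by omega,
        show ((m+2:Nat):Int) - 1 = ((m+1:Nat):Int) by push_cast; ring,
        show ((m+1:Nat):Int) - 1 = ((m:Nat):Int) by push_cast; ring,
        show num + ((m+2:Nat):Int) = num + (m:Int) + 2 by push_cast; ring,
        e2]
    simp only [Prod.mk.injEq]
    all_goals refine ⟨trivial, by push_cast; try ring, by push_cast; try ring, by push_cast; try ring⟩
  · rw [hget2 r c, hget1 r c]
    split_ifs with h1 h2 h3 h4 h5 <;> first | rfl | (exfalso; omega) | (push_cast at *; omega)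

theorem bnr_inv {N m : Nat} {g : List (List Int)} {num : Int}
    (hm : m + 1 < N) (hsh : shapeN N g) :
    ∃ g', bottomAndRight ((m:Int)+2) g ((m:Int)+1) 0 num
        = (g', 0, ((m:Int)+1), num + 2*(m:Int) + 3) ∧ shapeN N g' ∧
      ∀ r c : Nat, getc g' r c =
        if r = m+1 ∧ c ≤ m+1 then num + c
        else if c = m+1 ∧ r ≤ m then num + 2*((m:Int)+1) - r
        else getc g r c := by
  obtain ⟨g1, e1, hsh1, hget1⟩ := fillR_spec (N := N) (m+2) g (m+1) 0 num hsh (by omega) (by omega)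
  obtain ⟨g2, e2, hsh2, hget2⟩ := fillU_spec (N := N) (m+1) g1 m (m+1) (num + (m:Int) + 2) hsh1 (by omega) (by omega) (by omega)
  refine ⟨g2, ?_, hsh2, fun r c => ?_⟩
  · unfold bottomAndRight
    rw [show ((m:Int)+2).toNat = m+2 by omega,
        show (0:Int) = ((0:Nat):Int) by norm_num,
        show (m:Int)+1 = ((m+1:Nat):Int) by push_cast; ring,
        e1, Nat.zero_add]
    dsimp only
    rw [show ((m:Int)+2-1).toNat = m+1 by omega,
        show ((m+2:Nat):Int) - 1 = ((m+1:Nat):Int) by push_cast; ring,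
        show ((m+1:Nat):Int) - 1 = ((m:Nat):Int) by push_cast; ring,
        show num + ((m+2:Nat):Int) = num + (m:Int) + 2 by push_cast; ring,
        e2]
    simp only [Prod.mk.injEq]
    all_goals refine ⟨trivial, by push_cast; try ring, by push_cast; try ring, by push_cast; try ring⟩
  · rw [hget2 r c, hget1 r c]
    split_ifs with h1 h2 h3 h4 h5 <;> first | rfl | (exfalso; omega) | (push_cast at *; omega)

theorem getc_combine {N : Nat} (h : Bool) (m : Nat)
    (hcf : Bool) (hcfe : colFirstAt h (m+1) = hcf)
    (g g' : List (List Int))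
    (hget : ∀ r c : Nat, r < N → c < N → getc g r c = if max r c ≤ m then valB h r c else 0)
    (hget' : ∀ r c : Nat, getc g' r c =
      if (if hcf then c else r) = m+1 ∧ (if hcf then r else c) ≤ m+1 then ((m:Int)+1)^2+1 + (if hcf then (r:Int) else (c:Int))
      else if (if hcf then r else c) = m+1 ∧ (if hcf then c else r) ≤ m then ((m:Int)+1)^2+1 + 2*((m:Int)+1) - (if hcf then (c:Int) else (r:Int))
      else getc g r c) :
    ∀ r c : Nat, r < N → c < N →
      getc g' r c = if max r c ≤ m+1 then valB h r c else 0 := by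
  intro r c hr hc
  rw [hget' r c]
  have hvB : ∀ r' c' : Nat, max r' c' = m+1 → valB h (r':Int) (c':Int) =
      if colFirstAt h (m+1) then
        (if c' = m+1 then (((m+1:Nat):Int)*((m+1:Nat):Int)+1) + r' else (((m+1:Nat):Int)*((m+1:Nat):Int)+1) + ((m+1:Nat):Int) + (((m+1:Nat):Int) - c'))
      else
        (if r' = m+1 then (((m+1:Nat):Int)*((m+1:Nat):Int)+1) + c' else (((m+1:Nat):Int)*((m+1:Nat):Int)+1) + ((m+1:Nat):Int) + (((m+1:Nat):Int) - r')) :=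
    fun r' c' hmx => valB_char h (m+1) r' c' (by omega) hmx
  cases hcf
  · -- row-first layer (bottomAndRight)
    simp only [if_false, Bool.false_eq_true, ite_false] at hget' ⊢
    by_cases hA : r = m+1 ∧ c ≤ m+1
    · rw [if_pos hA, if_pos (by omega : max r c ≤ m+1),
        hvB r c (by omega), hcfe]
      simp only [Bool.false_eq_true, ite_false, if_pos hA.1]
      push_cast; ring
    · rw [if_neg hA]
      by_cases hB : c = m+1 ∧ r ≤ m
      · rw [if_pos hB, if_pos (by omega : max r c ≤ m+1),
          hvB r c (by omega), hcfe]
        simp only [Bool.false_eq_true, ite_false, if_neg (by omega : ¬ r = m+1)]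
        push_cast; ring
      · rw [if_neg hB, hget r c hr hc]
        by_cases hC : max r c ≤ m
        · rw [if_pos hC, if_pos (by omega : max r c ≤ m+1)]
        · rw [if_neg hC, if_neg (by omega : ¬ max r c ≤ m+1)]
  · -- column-first layer (rightAndBottom)
    simp only [if_true, ite_true] at hget' ⊢
    by_cases hA : c = m+1 ∧ r ≤ m+1
    · rw [if_pos hA, if_pos (by omega : max r c ≤ m+1),
        hvB r c (by omega), hcfe]
      simp only [ite_true, if_pos hA.1]
      push_cast; ring
    · rw [if_neg hA]
      by_cases hB : r = m+1 ∧ c ≤ m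
      · rw [if_pos hB, if_pos (by omega : max r c ≤ m+1),
          hvB r c (by omega), hcfe]
        simp only [ite_true, if_neg (by omega : ¬ c = m+1)]
        push_cast; ring
      · rw [if_neg hB, hget r c hr hc]
        by_cases hC : max r c ≤ m
        · rw [if_pos hC, if_pos (by omega : max r c ≤ m+1)]
        · rw [if_neg hC, if_neg (by omega : ¬ max r c ≤ m+1)]

theorem stepA_inv {N : Nat} {h : Bool} {m : Nat} {st}
    (hInv : WalkInv N h m st) (hm : m + 1 < N) :
    WalkInv N h (m+1) (stepA st ((m:Int)+1)) := by
  obtain ⟨g, n0, n1, num, flag⟩ := st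
  obtain ⟨hsh, hn0, hn1, hnum, hflag, hget⟩ := hInv
  simp only at hsh hn0 hn1 hnum hflag hget
  cases hcf : colFirstAt h (m+1)
  · -- layer m+1 is bottomAndRight
    have hnow := invNow_of_colFirst_succ_false hcf
    rw [hnow] at hn0 hn1
    simp only at hn0 hn1
    subst hn0 hn1 hnum
    have hflag' : flag = false := hflag.trans hcf
    subst hflag'
    obtain ⟨g', e, hsh', hget'⟩ := bnr_inv (N := N) (m := m) (g := g) (num := ((m:Int)+1)^2+1) hm hsh
    unfold stepA
    simp only [Bool.false_eq_true, ite_false]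
    rw [show ((m:Int)+1+1) = ((m:Int)+2) by ring, e]
    refine ⟨hsh', by simp [invNow, hcf], by simp [invNow, hcf],
      by simp only; push_cast; ring,
      by simp only [colFirstAt_succ h (m+1), hcf],
      getc_combine h m false hcf g g' hget (fun r c => by
        rw [hget' r c]
        simp only [ite_false, Bool.false_eq_true]
        try (split_ifs <;> first | rfl | (exfalso; omega) | (push_cast; try ring)))⟩
  · -- layer m+1 is rightAndBottom
    have hnow := invNow_of_colFirst_succ_true hcf
    rw [hnow] at hn0 hn1
    simp only at hn0 hn1
    subst hn0 hn1 hnum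
    have hflag' : flag = true := hflag.trans hcf
    subst hflag'
    obtain ⟨g', e, hsh', hget'⟩ := rnb_inv (N := N) (m := m) (g := g) (num := ((m:Int)+1)^2+1) hm hsh
    unfold stepA
    simp only [ite_true]
    rw [show ((m:Int)+1+1) = ((m:Int)+2) by ring, e]
    refine ⟨hsh', by simp [invNow, hcf], by simp [invNow, hcf],
      by simp only; push_cast; ring,
      by simp only [colFirstAt_succ h (m+1), hcf],
      getc_combine h m true hcf g g' hget (fun r c => by
        rw [hget' r c]
        simp only [ite_true]
        try (split_ifs <;> first | rfl | (exfalso; omega) | (push_cast; try ring)))⟩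

theorem fold_inv {N : Nat} {h : Bool} (hN : 1 ≤ N) (init)
    (h0 : WalkInv N h 0 init) (m : Nat) (hm : m < N) :
    WalkInv N h m ((PySem.List.pyRange 1 ((m:Int)+1) 1).foldl stepA init) := by
  induction m with
  | zero =>
    rw [show ((0:Nat):Int)+1 = 1 by norm_num,
      PySem.List.pyRange_one_eq_nil (le_refl 1)]
    exact h0
  | succ m ih =>
    rw [show ((m+1:Nat):Int)+1 = ((m:Int)+1)+1 by push_cast; ring,
      PySem.List.pyRange_one_succ_right (by omega : (1:Int) ≤ (m:Int)+1),
      List.foldl_append]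
    simp only [List.foldl_cons, List.foldl_nil]
    exact stepA_inv (ih (by omega)) hm

theorem getc_zeros (n : Int) (r c : Nat) :
    getc ((PySem.List.pyRange 0 n 1).map
      (fun _ => (PySem.List.pyRange 0 n 1).map (fun _ => (0:Int)))) r c = 0 := by
  unfold getc
  rcases Nat.lt_or_ge r ((PySem.List.pyRange 0 n 1).map
      (fun _ => (PySem.List.pyRange 0 n 1).map (fun _ => (0:Int)))).length with hr | hr
  · rw [List.getD_eq_getElem _ _ hr, List.getElem_map]
    cases hoc : (PySem.List.pyRange 0 n 1)[c]? <;>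
      simp [List.getD, List.getElem?_map, hoc]
  · rw [List.getD_eq_default _ _ hr]
    simp [List.getD]

theorem shape_zeros (n : Int) (hn : 1 ≤ n) :
    shapeN n.toNat ((PySem.List.pyRange 0 n 1).map
      (fun _ => (PySem.List.pyRange 0 n 1).map (fun _ => (0:Int)))) := by
  constructor
  · simp [PySem.List.length_pyRange_one]
  · intro row hrow
    obtain ⟨x, _, rfl⟩ := List.mem_map.mp hrow
    simp [PySem.List.length_pyRange_one]

theorem valB_zero_zero (h : Bool) : valB h ((0:Nat):Int) ((0:Nat):Int) = 1 := by
  simp [valB]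

theorem init_inv (n : Int) (h : Bool) (hn : 1 ≤ n) :
    WalkInv n.toNat h 0
      (set2 ((PySem.List.pyRange 0 n 1).map
        (fun _ => (PySem.List.pyRange 0 n 1).map (fun _ => (0:Int)))) 0 0 1,
       0, 0, 2, h) := by
  have hz := shape_zeros n hn
  have hN1 : 1 ≤ n.toNat := by omega
  have h00 : (0:Int) = ((0:Nat):Int) := by norm_num
  refine ⟨?_, by simp [invNow], by simp [invNow], by norm_num, ?_, fun r c hr hc => ?_⟩
  · simp only
    have := set2_shape hz (show (0:Nat) < n.toNat by omega) (show (0:Nat) < n.toNat by omega) 1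
    simpa using this
  · simp only [colFirstAt]
    norm_num
  · simp only
    have hgc := set2_getc hz (show (0:Nat) < n.toNat by omega) (show (0:Nat) < n.toNat by omega) 1 r c
    simp only [Nat.cast_zero] at hgc
    rw [hgc, getc_zeros]
    split_ifs with h1 h2 h3
    · obtain ⟨rfl, rfl⟩ := h1
      exact (valB_zero_zero h).symm
    · exfalso; omega
    · exfalso; omega
    · rfl

theorem solution_spec_aux (n : Int) (h : Bool) (hn : 1 ≤ n) :
    solution n h = solution_alt n h := by
  have hNn : ((n.toNat : Nat) : Int) = n := Int.toNat_of_nonneg (by omega)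
  have hN1 : 1 ≤ n.toNat := by omega
  have hfold := fold_inv (N := n.toNat) (h := h) hN1 _ (init_inv n h hn)
      (n.toNat - 1) (by omega)
  rw [show ((n.toNat - 1 : Nat) : Int) + 1 = n by omega] at hfold
  obtain ⟨hsh, -, -, -, -, hget⟩ := hfold
  unfold solution solution_alt
  have hlenR : (PySem.List.pyRange 0 n 1).length = n.toNat := by
    simp [PySem.List.length_pyRange_one]
  apply List.ext_getElem
  · rw [hsh.1]
    simp [hlenR]
  · intro i hi1 hi2
    have hiN : i < n.toNat := by rw [hsh.1] at hi1; exact hi1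
    apply List.ext_getElem
    · rw [List.getElem_map, List.length_map, hlenR]
      have hrowmem : (((PySem.List.pyRange 1 n 1).foldl stepA
          (set2 ((PySem.List.pyRange 0 n 1).map
            (fun _ => (PySem.List.pyRange 0 n 1).map (fun _ => (0:Int)))) 0 0 1,
           0, 0, 2, h)).1)[i] ∈ _ := List.getElem_mem hi1
      exact hsh.2 _ hrowmem
    · intro j hj1 hj2
      have hjN : j < n.toNat := by
        have hrowmem := List.getElem_mem hi1
        rw [hsh.2 _ hrowmem] at hj1
        exact hj1
      have hgc : getc (((PySem.List.pyRange 1 n 1).foldl stepA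
          (set2 ((PySem.List.pyRange 0 n 1).map
            (fun _ => (PySem.List.pyRange 0 n 1).map (fun _ => (0:Int)))) 0 0 1,
           0, 0, 2, h)).1) i j = valB h i j := by
        rw [hget i j hiN hjN, if_pos (by omega)]
      unfold getc at hgc
      rw [List.getD_eq_getElem _ _ hi1, List.getD_eq_getElem _ _ hj1] at hgc
      rw [hgc]
      simp only [List.getElem_map, PySem.List.getElem_pyRange_one]
      norm_num

-- ===== VERDICT (by name: the statement is the Claim_ definition above) =====
theorem solution_spec : Claim_equal_solution := by
  intro n h _ hpre
  unfold Spec_solution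
  exact solution_spec_aux n h hpre
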